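-- pv_equiv track=rewrite | github.com/ZXZ12310304/wardlung-compass | src/agents/asr.py | _ctc_collapse
-- ===== SOURCE A (Python) =====
-- from typing import Optional, Tuple, Dict, Any, List
--
-- def _ctc_collapse(ids: List[int], blank_id: Optional[int]) -> List[int]:
--
--     collapsed: List[int] = []
--     prev = None
--     for i in ids:
--         if prev is not None and i == prev:
--             continue
--         prev = i
--         if blank_id is not None and i == blank_id:
--             continue
--         collapsed.append(i)
--     return collapsed
-- ===== SOURCE B (Python) =====
-- from typing import Optional, List
--
--
-- def _ctc_collapse(ids: List[int], blank_id: Optional[int]) -> List[int]: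
--     # Divide and conquer: collapse each half recursively, then merge the two
--     # collapsed halves, dropping the right head when it joins a run that ends
--     # the left half (collapse preserves first/last elements, so comparing the
--     # collapsed boundary elements is equivalent to comparing the raw ones).
--     def collapse(seg: List[int]) -> List[int]:
--         if len(seg) <= 1:
--             return list(seg)
--         mid = len(seg) // 2
--         left = collapse(seg[:mid])
--         right = collapse(seg[mid:])
--         if left[-1] == right[0]:
--             right = right[1:]
--         return left + right
--
--     collapsed = collapse(ids)
--     if blank_id is None:
--         return collapsed
--     return [x for x in collapsed if x != blank_id]
-- ===== Notes on version B (the rewrite author's own statement) =====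
-- stated objective: alternative
-- what changed: Replaces A's single fused left-to-right loop (prev-tracking dedup interleaved with blank skipping) by a divide-and-conquer collapse: split the list in halves, recursively collapse each half, merge by dropping the right half's head when it equals the left half's last element, then filter the blank id in a separate pass.
import Mathlib
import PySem

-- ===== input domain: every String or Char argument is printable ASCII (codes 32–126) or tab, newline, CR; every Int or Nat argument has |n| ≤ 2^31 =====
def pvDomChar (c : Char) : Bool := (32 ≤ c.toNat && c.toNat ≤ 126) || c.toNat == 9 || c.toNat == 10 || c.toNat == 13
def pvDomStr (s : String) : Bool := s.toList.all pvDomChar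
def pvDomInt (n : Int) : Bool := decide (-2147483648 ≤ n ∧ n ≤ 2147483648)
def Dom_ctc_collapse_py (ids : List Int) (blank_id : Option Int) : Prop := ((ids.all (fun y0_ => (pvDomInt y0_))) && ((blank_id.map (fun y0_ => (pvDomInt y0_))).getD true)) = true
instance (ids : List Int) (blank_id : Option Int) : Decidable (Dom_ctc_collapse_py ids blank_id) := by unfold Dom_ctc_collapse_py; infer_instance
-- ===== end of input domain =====

-- B replaces A's fused prev-tracking loop by a divide-and-conquer collapse (split, recurse, merge at the boundary) followed by a separate blank filter (alternative decomposition; same result).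

-- ===== PORT A =====
-- A's loop, step for step: 'prev' tracks the last seen id; equal-to-prev is skipped,
-- otherwise prev is updated and the id is appended unless it equals blank_id.
def ctcLoopA (blank_id : Option Int) : List Int → Option Int → List Int
  | [], _ => []
  | i :: rest, prev =>
    if prev = some i then ctcLoopA blank_id rest prev
    else
      if blank_id = some i then ctcLoopA blank_id rest (some i)
      else i :: ctcLoopA blank_id rest (some i)

def ctc_collapse_py (ids : List Int) (blank_id : Option Int) : List Int :=
  ctcLoopA blank_id ids none

-- ===== PORT B =====
-- Source B's 'collapse': split at the midpoint, collapse both halves, merge dropping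
-- the right head when it equals the left half's last element.
def collapseDnc : List Int → List Int
  | [] => []
  | [x] => [x]
  | x :: y :: rest =>
    let mid := (x :: y :: rest).length / 2
    let left := collapseDnc ((x :: y :: rest).take mid)
    let right := collapseDnc ((x :: y :: rest).drop mid)
    if left.getLast? = right.head? then left ++ right.tail else left ++ right
termination_by l => l.length
decreasing_by
  all_goals simp [List.length_take, List.length_drop]
  all_goals omega

def ctc_collapse_py_alt (ids : List Int) (blank_id : Option Int) : List Int :=
  let collapsed := collapseDnc ids
  match blank_id with
  | none => collapsed
  | some b => collapsed.filter (fun x => decide (x ≠ b))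

-- ===== PRECONDITION & SPEC =====
def Spec_ctc_collapse_py (ids : List Int) (blank_id : Option Int) (out : List Int) : Prop := out = ctc_collapse_py_alt ids blank_id
instance (ids : List Int) (blank_id : Option Int) (out : List Int) : Decidable (Spec_ctc_collapse_py ids blank_id out) := by unfold Spec_ctc_collapse_py; infer_instance

-- ===== CLAIM (what is proved, stated in full; the proofs are below) =====
def Claim_equal_ctc_collapse_py : Prop := ∀ (ids : List Int) (blank_id : Option Int), Dom_ctc_collapse_py ids blank_id → Spec_ctc_collapse_py ids blank_id (ctc_collapse_py ids blank_id)

-- ===== LEMMAS AND PROOFS =====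

-- proof-only helper: straightforward left-to-right collapse with an explicit "previous id" state.
def collapseAux : Option Int → List Int → List Int
  | _, [] => []
  | prev, i :: rest =>
    if prev = some i then collapseAux prev rest else i :: collapseAux (some i) rest

-- proof-only helper: collapse of runs without blank filtering.
def collapseRuns (l : List Int) : List Int := collapseAux none l

theorem collapseRuns_cons (x : Int) (ids : List Int) :
    collapseRuns (x :: ids) = x :: collapseAux (some x) ids := by
  simp [collapseRuns, collapseAux]

theorem collapseAux_append (prev : Option Int) (L R : List Int) :
    collapseAux prev (L ++ R) = collapseAux prev L ++ collapseAux (L.getLast?.or prev) R := by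
  induction L generalizing prev with
  | nil => simp [collapseAux]
  | cons i L' ih =>
    by_cases h : prev = some i
    · simp only [List.cons_append, collapseAux, if_pos h, ih]
      cases L' with
      | nil => simp [collapseAux, h]
      | cons j L'' => simp [List.getLast?_cons]
    · simp only [List.cons_append, collapseAux, if_neg h, ih]
      cases L' with
      | nil => simp [collapseAux]
      | cons j L'' => simp [List.getLast?_cons]

theorem collapseAux_some (a : Int) (R : List Int) :
    collapseAux (some a) R =
      if (collapseRuns R).head? = some a then (collapseRuns R).tail else collapseRuns R := by
  cases R with
  | nil => simp [collapseRuns, collapseAux]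
  | cons r R' =>
    rw [collapseRuns_cons]
    by_cases h : a = r
    · subst h; simp [collapseAux]
    · have h' : ¬ r = a := fun hh => h hh.symm
      simp [collapseAux, h, h']

theorem getLast?_cons_collapseAux (a : Int) (l : List Int) :
    (a :: collapseAux (some a) l).getLast? = (a :: l).getLast? := by
  induction l generalizing a with
  | nil => rfl
  | cons i l' ih =>
    by_cases h : a = i
    · subst h
      rw [show collapseAux (some a) (a :: l') = collapseAux (some a) l' from by simp [collapseAux]]
      rw [ih, List.getLast?_cons_cons]
    · have h' : ¬ (some a = some i) := by simp [h]
      simp only [collapseAux, if_neg h', List.getLast?_cons_cons, ih]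

theorem collapseRuns_getLast? (l : List Int) : (collapseRuns l).getLast? = l.getLast? := by
  cases l with
  | nil => rfl
  | cons x rest => rw [collapseRuns_cons, getLast?_cons_collapseAux]

theorem collapseRuns_append (L R : List Int) (hL : L ≠ []) :
    collapseRuns (L ++ R) =
      if (collapseRuns L).getLast? = (collapseRuns R).head? then
        collapseRuns L ++ (collapseRuns R).tail
      else collapseRuns L ++ collapseRuns R := by
  obtain ⟨a, ha⟩ : ∃ a, L.getLast? = some a := by
    cases h : L.getLast? with
    | none => exact absurd (List.getLast?_eq_none_iff.mp h) hL
    | some a => exact ⟨a, rfl⟩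
  have : collapseRuns (L ++ R) = collapseRuns L ++ collapseAux (some a) R := by
    simpa [collapseRuns, ha] using collapseAux_append none L R
  rw [this, collapseAux_some, collapseRuns_getLast?, ha]
  rcases eq_or_ne ((collapseRuns R).head?) (some a) with h | h
  · simp [h]
  · simp [h, Ne.symm h]

theorem collapseDnc_eq (l : List Int) : collapseDnc l = collapseRuns l := by
  fun_induction collapseDnc l with
  | case1 => rfl
  | case2 x => simp [collapseRuns, collapseAux]
  | case3 x y rest mid left right h ih1 ih2 =>
    have hmid : mid ≠ 0 := by simp only [mid, List.length_cons]; omega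
    have htake : (x :: y :: rest).take mid ≠ [] := by
      simp [List.take_eq_nil_iff, hmid]
    have hs := collapseRuns_append ((x :: y :: rest).take mid) ((x :: y :: rest).drop mid) htake
    rw [List.take_append_drop] at hs
    rw [hs, if_pos (by rw [← ih1, ← ih2]; try exact h)]
    show collapseDnc (List.take mid (x :: y :: rest)) ++ (collapseDnc (List.drop mid (x :: y :: rest))).tail = _
    rw [ih1, ih2]
  | case4 x y rest mid left right h ih1 ih2 =>
    have hmid : mid ≠ 0 := by simp only [mid, List.length_cons]; omega
    have htake : (x :: y :: rest).take mid ≠ [] := by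
      simp [List.take_eq_nil_iff, hmid]
    have hs := collapseRuns_append ((x :: y :: rest).take mid) ((x :: y :: rest).drop mid) htake
    rw [List.take_append_drop] at hs
    rw [hs, if_neg (by rw [← ih1, ← ih2]; try exact h)]
    show collapseDnc (List.take mid (x :: y :: rest)) ++ collapseDnc (List.drop mid (x :: y :: rest)) = _
    rw [ih1, ih2]

-- B without the collapsedDnc detour, in terms of the simple left-to-right collapse.
def keepNonBlank (blank_id : Option Int) (x : Int) : Bool :=
  match blank_id with
  | none => true
  | some b => decide (x ≠ b)

theorem alt_eq_filter (ids : List Int) (blank_id : Option Int) :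
    ctc_collapse_py_alt ids blank_id = (collapseRuns ids).filter (keepNonBlank blank_id) := by
  unfold ctc_collapse_py_alt
  rw [collapseDnc_eq]
  cases blank_id with
  | none => simp [show keepNonBlank none = fun _ => true from rfl]
  | some b => rfl

theorem ctcLoopA_eq (blank_id : Option Int) (ids : List Int) (prev : Option Int) :
    ctcLoopA blank_id ids prev =
      (collapseAux prev ids).filter (keepNonBlank blank_id) := by
  induction ids generalizing prev with
  | nil => rfl
  | cons i rest ih =>
    by_cases hp : prev = some i
    · simp [ctcLoopA, collapseAux, hp, ih]
    · by_cases hb : blank_id = some i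
      · subst hb
        simp [ctcLoopA, collapseAux, hp, ih, keepNonBlank]
      · cases blank_id with
        | none =>
          simp only [ctcLoopA, collapseAux, if_neg hp, if_neg hb, List.filter_cons,
            keepNonBlank, ite_true, ih]
        | some b =>
          have hib : ¬ i = b := fun h => hb (by simp [h])
          simp [ctcLoopA, collapseAux, hp, hb, ih, hib, keepNonBlank]

-- ===== VERDICT (by name: the statement is the Claim_ definition above) =====
theorem ctc_collapse_py_spec : Claim_equal_ctc_collapse_py := by
  intro ids blank_id _
  unfold Spec_ctc_collapse_py ctc_collapse_py
  rw [alt_eq_filter, ctcLoopA_eq]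
  rfl
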